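-- pv_equiv track=rewrite | github.com/mool32/oscillatory-nfl-cancer | step05_nfl_clustering.py | infer_pathway
-- ===== SOURCE A (Python) =====
-- def infer_pathway(genes):
--     """Infer pathway name from gene set."""
--     pathway_markers = {
--         "JAK-STAT/SOCS": {"STAT3", "SOCS3", "JAK1", "JAK2", "STAT1", "STAT5B", "SOCS1", "CISH"},
--         "p53/MDM2": {"TP53", "MDM2"},
--         "Rb/E2F": {"RB1", "E2F1", "CCNE1", "TFDP1", "E2F2", "E2F3"},
--         "NF-κB": {"RELA", "NFKBIA", "TNFAIP3", "TRAF6"},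
--         "TGF-β/SMAD": {"SMAD3", "SMAD7", "SMAD2", "SMAD4", "SMAD5", "TGFBR1"},
--         "mTOR/IRS": {"MTOR", "IRS1", "IRS2", "PIK3CA", "PIK3R3", "PIK3R1"},
--         "MAPK/ERK": {"MAPK1", "MAPK14", "DUSP1"},
--         "Cell Cycle/CDK": {"CDK2", "CDKN1A", "CDKN1B", "CDKN2A", "FOXO1", "FOXO3", "FOXO4", "FOXO6"},
--         "PI3K/PTEN": {"PTEN", "PTK2", "PIK3CA", "PIK3R3"},
--         "Hedgehog/GLI": {"GLI1", "GLI2", "GLI3", "SUFU"},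
--         "p53/Apoptosis": {"TP53", "BCL2", "PMAIP1", "SIVA1", "BID", "BBC3"},
--         "Wnt/β-catenin": {"CTNNB1", "CDH1", "AXIN1"},
--         "Hippo/YAP": {"YAP1", "AXIN1", "CSNK1E"},
--         "BMP/SMAD": {"BMPR1A", "BMPR1B", "BMPR2", "SMAD3", "MAPK1"},
--     }
--
--     best_match = "Unknown"
--     best_overlap = 0
--     for name, markers in pathway_markers.items():
--         overlap = len(genes & markers)
--         if overlap > best_overlap:
--             best_overlap = overlap
--             best_match = name
--
--     return best_match
-- ===== SOURCE B (Python) =====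
-- # B: precomputed inverted index (gene -> pathway indices) + a flat array of 14
-- # counters filled in one pass over the genes; the winner is picked with max over
-- # (name, count) pairs (first maximum), "Unknown" when no pathway has any overlap.
--
-- _PATHWAY_NAMES = [
--     "JAK-STAT/SOCS", "p53/MDM2", "Rb/E2F", "NF-κB", "TGF-β/SMAD", "mTOR/IRS",
--     "MAPK/ERK", "Cell Cycle/CDK", "PI3K/PTEN", "Hedgehog/GLI", "p53/Apoptosis",
--     "Wnt/β-catenin", "Hippo/YAP", "BMP/SMAD",
-- ]
--
-- # inverted index, precomputed once from the marker table: gene -> indices of the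
-- # pathways (in _PATHWAY_NAMES) whose marker set contains it
-- _GENE_TO_IDS = {
--     "STAT3": [0], "SOCS3": [0], "JAK1": [0], "JAK2": [0], "STAT1": [0],
--     "STAT5B": [0], "SOCS1": [0], "CISH": [0],
--     "TP53": [1, 10], "MDM2": [1],
--     "RB1": [2], "E2F1": [2], "CCNE1": [2], "TFDP1": [2], "E2F2": [2], "E2F3": [2],
--     "RELA": [3], "NFKBIA": [3], "TNFAIP3": [3], "TRAF6": [3],
--     "SMAD3": [4, 13], "SMAD7": [4], "SMAD2": [4], "SMAD4": [4], "SMAD5": [4],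
--     "TGFBR1": [4],
--     "MTOR": [5], "IRS1": [5], "IRS2": [5], "PIK3CA": [5, 8], "PIK3R3": [5, 8],
--     "PIK3R1": [5],
--     "MAPK1": [6, 13], "MAPK14": [6], "DUSP1": [6],
--     "CDK2": [7], "CDKN1A": [7], "CDKN1B": [7], "CDKN2A": [7], "FOXO1": [7],
--     "FOXO3": [7], "FOXO4": [7], "FOXO6": [7],
--     "PTEN": [8], "PTK2": [8],
--     "GLI1": [9], "GLI2": [9], "GLI3": [9], "SUFU": [9],
--     "BCL2": [10], "PMAIP1": [10], "SIVA1": [10], "BID": [10], "BBC3": [10],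
--     "CTNNB1": [11], "CDH1": [11], "AXIN1": [11, 12],
--     "YAP1": [12], "CSNK1E": [12],
--     "BMPR1A": [13], "BMPR1B": [13], "BMPR2": [13],
-- }
--
--
-- def infer_pathway(genes):
--     """Infer pathway name from gene set."""
--     counts = [0] * 14
--     for g in genes:
--         for i in _GENE_TO_IDS.get(g, []):
--             counts[i] += 1
--
--     best_name, best_count = max(zip(_PATHWAY_NAMES, counts), key=lambda t: t[1])
--     return best_name if best_count > 0 else "Unknown"
-- ===== Notes on version B (the rewrite author's own statement) =====
-- stated objective: alternative
-- what changed: Replaces A's loop of per-pathway set intersections with a precomputed inverted index (gene -> pathway indices) filling a flat array of 14 counters in one pass over the genes, the winner then picked as the first maximum of the (name, count) pairs.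
import Mathlib
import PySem

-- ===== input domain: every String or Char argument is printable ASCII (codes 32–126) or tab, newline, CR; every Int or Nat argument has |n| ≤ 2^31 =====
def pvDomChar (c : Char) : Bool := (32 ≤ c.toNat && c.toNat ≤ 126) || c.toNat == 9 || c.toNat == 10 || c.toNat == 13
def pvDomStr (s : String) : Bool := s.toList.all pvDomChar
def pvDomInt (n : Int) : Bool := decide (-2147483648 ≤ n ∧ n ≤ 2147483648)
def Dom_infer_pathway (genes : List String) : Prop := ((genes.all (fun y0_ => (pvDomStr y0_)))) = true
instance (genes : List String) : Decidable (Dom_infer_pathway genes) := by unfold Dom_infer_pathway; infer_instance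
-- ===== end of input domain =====

-- B replaces A's per-pathway set intersections by a precomputed inverted index
-- (gene -> pathway indices) filling a flat array of counters, picking the winner
-- with a first-maximum over (name, count) pairs (objective: alternative).


-- ===== PORT A =====
-- A's dict literal, in insertion order (values are Python set literals; only membership is used)
def pvPathwayMarkers : List (String × List String) :=
  [("JAK-STAT/SOCS", ["STAT3", "SOCS3", "JAK1", "JAK2", "STAT1", "STAT5B", "SOCS1", "CISH"]),
   ("p53/MDM2", ["TP53", "MDM2"]),
   ("Rb/E2F", ["RB1", "E2F1", "CCNE1", "TFDP1", "E2F2", "E2F3"]),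
   ("NF-κB", ["RELA", "NFKBIA", "TNFAIP3", "TRAF6"]),
   ("TGF-β/SMAD", ["SMAD3", "SMAD7", "SMAD2", "SMAD4", "SMAD5", "TGFBR1"]),
   ("mTOR/IRS", ["MTOR", "IRS1", "IRS2", "PIK3CA", "PIK3R3", "PIK3R1"]),
   ("MAPK/ERK", ["MAPK1", "MAPK14", "DUSP1"]),
   ("Cell Cycle/CDK", ["CDK2", "CDKN1A", "CDKN1B", "CDKN2A", "FOXO1", "FOXO3", "FOXO4", "FOXO6"]),
   ("PI3K/PTEN", ["PTEN", "PTK2", "PIK3CA", "PIK3R3"]),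
   ("Hedgehog/GLI", ["GLI1", "GLI2", "GLI3", "SUFU"]),
   ("p53/Apoptosis", ["TP53", "BCL2", "PMAIP1", "SIVA1", "BID", "BBC3"]),
   ("Wnt/β-catenin", ["CTNNB1", "CDH1", "AXIN1"]),
   ("Hippo/YAP", ["YAP1", "AXIN1", "CSNK1E"]),
   ("BMP/SMAD", ["BMPR1A", "BMPR1B", "BMPR2", "SMAD3", "MAPK1"])]

-- len(genes & markers); strict '>' keeps the first best name, start ("Unknown", 0)
def infer_pathway (genes : List String) : String :=
  (pvPathwayMarkers.foldl
    (fun (acc : String × Int) p =>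
      let overlap : Int := ((PySem.Set.inter genes p.2).length : Int)
      if overlap > acc.2 then (p.1, overlap) else acc)
    ("Unknown", 0)).1

-- ===== PORT B =====
-- Source B's _PATHWAY_NAMES literal
def pvNamesAlt : List String :=
  ["JAK-STAT/SOCS", "p53/MDM2", "Rb/E2F", "NF-κB", "TGF-β/SMAD", "mTOR/IRS",
   "MAPK/ERK", "Cell Cycle/CDK", "PI3K/PTEN", "Hedgehog/GLI", "p53/Apoptosis",
   "Wnt/β-catenin", "Hippo/YAP", "BMP/SMAD"]

-- Source B's _GENE_TO_IDS literal: gene -> indices of the pathways containing it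
def pvGeneIds : PySem.Dict String (List Nat) :=
  ⟨[("STAT3", [0]), ("SOCS3", [0]), ("JAK1", [0]), ("JAK2", [0]), ("STAT1", [0]),
    ("STAT5B", [0]), ("SOCS1", [0]), ("CISH", [0]),
    ("TP53", [1, 10]), ("MDM2", [1]),
    ("RB1", [2]), ("E2F1", [2]), ("CCNE1", [2]), ("TFDP1", [2]), ("E2F2", [2]), ("E2F3", [2]),
    ("RELA", [3]), ("NFKBIA", [3]), ("TNFAIP3", [3]), ("TRAF6", [3]),
    ("SMAD3", [4, 13]), ("SMAD7", [4]), ("SMAD2", [4]), ("SMAD4", [4]), ("SMAD5", [4]),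
    ("TGFBR1", [4]),
    ("MTOR", [5]), ("IRS1", [5]), ("IRS2", [5]), ("PIK3CA", [5, 8]), ("PIK3R3", [5, 8]),
    ("PIK3R1", [5]),
    ("MAPK1", [6, 13]), ("MAPK14", [6]), ("DUSP1", [6]),
    ("CDK2", [7]), ("CDKN1A", [7]), ("CDKN1B", [7]), ("CDKN2A", [7]), ("FOXO1", [7]),
    ("FOXO3", [7]), ("FOXO4", [7]), ("FOXO6", [7]),
    ("PTEN", [8]), ("PTK2", [8]),
    ("GLI1", [9]), ("GLI2", [9]), ("GLI3", [9]), ("SUFU", [9]),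
    ("BCL2", [10]), ("PMAIP1", [10]), ("SIVA1", [10]), ("BID", [10]), ("BBC3", [10]),
    ("CTNNB1", [11]), ("CDH1", [11]), ("AXIN1", [11, 12]),
    ("YAP1", [12]), ("CSNK1E", [12]),
    ("BMPR1A", [13]), ("BMPR1B", [13]), ("BMPR2", [13])]⟩

-- counts = [0]*14; counts[i] += 1 for each pathway index of each gene;
-- then max(zip(names, counts), key=t[1]) (first maximum) and the '> 0' check
def infer_pathway_alt (genes : List String) : String :=
  let counts : List Int :=
    genes.foldl
      (fun cs g => (pvGeneIds.getD g []).foldl (fun cs i => cs.set i (cs.getD i 0 + 1)) cs)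
      (List.replicate 14 0)
  match PySem.List.max? (pvNamesAlt.zip counts) (fun t => t.2) with
  | some t => if t.2 > 0 then t.1 else "Unknown"
  | none => "Unknown"

-- ===== PRECONDITION & SPEC =====
def Spec_infer_pathway (genes : List String) (out : String) : Prop := out = infer_pathway_alt genes
instance (genes : List String) (out : String) : Decidable (Spec_infer_pathway genes out) := by unfold Spec_infer_pathway; infer_instance

-- ===== CLAIM =====
def Claim_equal_infer_pathway : Prop := ∀ (genes : List String), Dom_infer_pathway genes → Spec_infer_pathway genes (infer_pathway genes)

-- ===== LEMMAS AND PROOFS =====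

set_option maxRecDepth 20000

-- the gene→index pairs listed row by row, flattened, used to analyse the literal index
def pvPairsIdx : List (String × Nat) :=
  (pvPathwayMarkers.zipIdx).flatMap (fun pi => pi.1.2.map (fun g => (g, pi.2)))

-- a nested fold over a flatMap-of-maps is the fold over the flattened pair list
theorem pv_foldl_flatMap_map {α β γ δ : Type} (l : List α) (f : α → List β) (g : α → β → γ)
    (step : δ → γ → δ) (init : δ) :
    (l.flatMap (fun p => (f p).map (g p))).foldl step init
      = l.foldl (fun d p => (f p).foldl (fun d b => step d (g p b)) d) init := by
  induction l generalizing init with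
  | nil => rfl
  | cons p t ih => simp [List.flatMap_cons, List.foldl_append, List.foldl_map, ih]

-- the literal index is the fold that builds it from the marker table
set_option maxHeartbeats 2000000 in
theorem pv_index_eq :
    pvGeneIds = pvPairsIdx.foldl (fun d q => d.modify q.1 [] (· ++ [q.2])) PySem.Dict.empty := by
  decide

theorem pvGeneIds_getD (g : String) :
    pvGeneIds.getD g [] = (pvPairsIdx.filter (fun q => q.1 == g)).map (·.2) := by
  rw [pv_index_eq, PySem.Dict.getD_foldl_modify_append]
  simp [PySem.Dict.getD_empty]

-- every pathway index in the pair list is < 14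
set_option maxHeartbeats 2000000 in
theorem pv_pairs_lt : ∀ q ∈ pvPairsIdx, q.2 < 14 := by decide

-- the table rows, read back by index (concrete, checked by evaluation)
set_option maxHeartbeats 2000000 in
theorem pv_table_map :
    pvPathwayMarkers = (List.range 14).map (fun i => pvPathwayMarkers.getD i ("", [])) := by
  decide

-- per row i: the pairs carrying index i are exactly row i's markers, the row is
-- duplicate-free, and its name is pvNamesAlt[i]
set_option maxHeartbeats 2000000 in
theorem pv_table_facts : ∀ i ∈ List.range 14,
    pvPairsIdx.filter (fun q => q.2 == i)
        = ((pvPathwayMarkers.getD i ("", [])).2).map (fun x => (x, i))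
      ∧ ((pvPathwayMarkers.getD i ("", [])).2).Nodup
      ∧ (pvPathwayMarkers.getD i ("", [])).1 = pvNamesAlt.getD i "" := by
  decide

-- per-gene: multiplicity of index i in g's index entry = count of g in row i's markers
theorem pv_count_entry (g : String) (i : Nat) (m : List String)
    (hfil : pvPairsIdx.filter (fun q => q.2 == i) = m.map (fun x => (x, i))) :
    (pvGeneIds.getD g []).count i = m.count g := by
  rw [pvGeneIds_getD, List.count_eq_countP, List.countP_map]
  have h1 : (List.countP ((fun x => x == i) ∘ (fun (q : String × Nat) => q.2)) (pvPairsIdx.filter (fun q => q.1 == g)))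
      = List.countP (fun (q : String × Nat) => q.1 == g) (pvPairsIdx.filter (fun q => q.2 == i)) := by
    rw [List.countP_filter, List.countP_filter]
    apply List.countP_congr
    intro q _
    simp [Function.comp, Bool.and_comm]
  rw [h1, hfil, List.countP_map, List.count_eq_countP]
  apply List.countP_congr
  intro x _
  simp [Function.comp]

-- incrementing in-range cells: the fold preserves length and adds the multiplicity
theorem pv_foldl_set_length (js : List Nat) (cs : List Int) :
    (js.foldl (fun cs i => cs.set i (cs.getD i 0 + 1)) cs).length = cs.length := by
  induction js generalizing cs with
  | nil => rfl
  | cons j t ih => rw [List.foldl_cons, ih, List.length_set]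

theorem pv_foldl_set_getD (js : List Nat) (cs : List Int) (i : Nat)
    (hb : ∀ j ∈ js, j < cs.length) :
    (js.foldl (fun cs i => cs.set i (cs.getD i 0 + 1)) cs).getD i 0
      = cs.getD i 0 + (js.count i : Int) := by
  induction js generalizing cs with
  | nil => simp
  | cons j t ih =>
    have hj : j < cs.length := hb j (by simp)
    have hb' : ∀ x ∈ t, x < (cs.set j (cs.getD j 0 + 1)).length := by
      intro x hx; simpa using hb x (by simp [hx])
    rw [List.foldl_cons, ih _ hb']
    have hset : (cs.set j (cs.getD j 0 + 1)).getD i 0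
        = if i = j then cs.getD j 0 + 1 else cs.getD i 0 := by
      show (cs.set j (cs.getD j 0 + 1))[i]?.getD 0 = _
      rw [List.getElem?_set]
      by_cases h1 : i = j
      · simp [h1, hj]
      · simp [show ¬ j = i from fun h => h1 h.symm, h1]
    rw [hset, List.count_cons]
    by_cases hij : i = j
    · simp [hij]
      omega
    · simp [hij, show ¬j = i from fun h => hij h.symm]

-- on a duplicate-free marker list, summing per-gene counts is counting the members
theorem pv_sum_count (m : List String) (hnd : m.Nodup) (l : List String) :
    (l.map (fun g => m.count g)).sum = l.countP (fun g => PySem.Set.contains m g) := by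
  induction l with
  | nil => rfl
  | cons g t ih =>
    rw [List.map_cons, List.sum_cons, List.countP_cons, ih]
    by_cases hg : g ∈ m
    · rw [List.count_eq_one_of_mem hnd hg]
      simp [hg]
      omega
    · rw [List.count_eq_zero.mpr hg]
      simp [hg]

-- B's counter array: cell i holds A's overlap for row i
theorem pv_counts_getD (genes : List String) (i : Nat) (hi : i ∈ List.range 14) :
    (genes.foldl
      (fun cs g => (pvGeneIds.getD g []).foldl (fun cs i => cs.set i (cs.getD i 0 + 1)) cs)
      (List.replicate 14 0)).getD i 0
    = ((PySem.Set.inter genes (pvPathwayMarkers.getD i ("", [])).2).length : Int) := by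
  obtain ⟨hfil, hnd, -⟩ := pv_table_facts i hi
  have h := pv_foldl_flatMap_map (δ := List Int) genes
      (fun g => pvGeneIds.getD g []) (fun _ b => b)
      (fun cs x => cs.set x (cs.getD x 0 + 1)) (List.replicate 14 0)
  simp only [List.map_id'] at h
  rw [← h, pv_foldl_set_getD]
  · rw [List.count_flatMap]
    have hmap : (genes.map (List.count i ∘ fun g => pvGeneIds.getD g []))
        = genes.map (fun g => (pvPathwayMarkers.getD i ("", [])).2.count g) := by
      apply List.map_congr_left
      intro g _
      exact pv_count_entry g i _ hfil
    rw [hmap, pv_sum_count _ hnd genes]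
    have hlen : (PySem.Set.inter genes (pvPathwayMarkers.getD i ("", [])).2).length
        = genes.countP (fun g => PySem.Set.contains (pvPathwayMarkers.getD i ("", [])).2 g) := by
      show (genes.filter _).length = _
      rw [List.countP_eq_length_filter]
    rw [hlen]
    have hi14 := List.mem_range.mp hi
    simp [List.getD_eq_getElem?_getD]
    interval_cases i <;> rfl
  · intro j hj
    rw [List.length_replicate]
    obtain ⟨g, -, hgj⟩ := List.mem_flatMap.mp hj
    rw [pvGeneIds_getD] at hgj
    obtain ⟨q, hq, rfl⟩ := List.mem_map.mp hgj
    exact pv_pairs_lt q (List.mem_of_mem_filter hq)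

-- B's counter array has length 14
theorem pv_counts_length_aux (gs : List String) (cs : List Int) :
    (gs.foldl
      (fun cs g => (pvGeneIds.getD g []).foldl (fun cs i => cs.set i (cs.getD i 0 + 1)) cs)
      cs).length = cs.length := by
  induction gs generalizing cs with
  | nil => rfl
  | cons g t ih => rw [List.foldl_cons, ih, pv_foldl_set_length]

theorem pv_counts_length (genes : List String) :
    (genes.foldl
      (fun cs g => (pvGeneIds.getD g []).foldl (fun cs i => cs.set i (cs.getD i 0 + 1)) cs)
      (List.replicate 14 (0 : Int))).length = 14 := by
  rw [pv_counts_length_aux, List.length_replicate]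

-- the invariant tying A's strict-'>' scan to B's first-maximum fold
def pvInv (acc : String × Int) (o : Option (String × Int)) : Prop :=
  (o = none ∧ acc = ("Unknown", 0)) ∨
  ∃ t, o = some t ∧ 0 ≤ t.2 ∧ ((0 < t.2 ∧ acc = t) ∨ (t.2 = 0 ∧ acc = ("Unknown", 0)))

theorem pv_scan (l : List (String × Int)) (h : ∀ t ∈ l, 0 ≤ t.2)
    (acc : String × Int) (o : Option (String × Int)) (hinv : pvInv acc o) :
    pvInv (l.foldl (fun acc t => if t.2 > acc.2 then t else acc) acc)
      (l.foldl (fun o t => match o with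
        | none => some t
        | some m => if m.2 < t.2 then some t else some m) o) := by
  induction l generalizing acc o with
  | nil => exact hinv
  | cons x t ih =>
    have hx : 0 ≤ x.2 := h x (by simp)
    rw [List.foldl_cons, List.foldl_cons]
    refine ih (fun t ht => h t (by simp [ht])) _ _ ?_
    rcases hinv with ⟨ho, ha⟩ | ⟨m, ho, hm0, hcase⟩
    · subst ho
      by_cases hpos : 0 < x.2
      · right; exact ⟨x, rfl, hx, Or.inl ⟨hpos, by simp [ha, show x.2 > (0:Int) from hpos]⟩⟩
      · right
        exact ⟨x, rfl, hx, Or.inr ⟨by omega, by simp [ha, show ¬ x.2 > (0:Int) by omega]⟩⟩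
    · subst ho
      rcases hcase with ⟨hmpos, ha⟩ | ⟨hmz, ha⟩
      · by_cases hlt : m.2 < x.2
        · right
          refine ⟨x, by simp [hlt], by omega, Or.inl ⟨by omega, ?_⟩⟩
          simp [ha, show x.2 > m.2 from hlt]
        · right
          refine ⟨m, by simp [hlt], hm0, Or.inl ⟨hmpos, ?_⟩⟩
          simp [ha, show ¬ x.2 > m.2 from hlt]
      · by_cases hlt : m.2 < x.2
        · right
          refine ⟨x, by simp [hlt], hx, Or.inl ⟨by omega, ?_⟩⟩
          simp [ha, show x.2 > (0:Int) by omega]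
        · right
          refine ⟨m, by simp [hlt], hm0, Or.inr ⟨hmz, ?_⟩⟩
          simp [ha, show ¬ x.2 > (0:Int) by omega]

-- PySem.List.max? with key .2 is the explicit first-maximum fold
theorem pv_max?_foldl (L : List (String × Int)) :
    PySem.List.max? L (fun t => t.2)
      = L.foldl (fun o t => match o with
          | none => some t
          | some m => if m.2 < t.2 then some t else some m) none := by
  unfold PySem.List.max?
  congr 1
  funext o t
  cases o <;> rfl

-- ===== VERDICT (by name: the statement is the Claim_ definition above) =====
set_option maxHeartbeats 2000000 in
theorem infer_pathway_spec : Claim_equal_infer_pathway := by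
  intro genes _
  show infer_pathway genes = infer_pathway_alt genes
  set counts : List Int :=
    genes.foldl
      (fun cs g => (pvGeneIds.getD g []).foldl (fun cs i => cs.set i (cs.getD i 0 + 1)) cs)
      (List.replicate 14 0) with hcounts
  set L : List (String × Int) :=
    (List.range 14).map (fun i =>
      (pvNamesAlt.getD i "", ((PySem.Set.inter genes (pvPathwayMarkers.getD i ("", [])).2).length : Int)))
    with hL
  -- A's fold over the table is the strict-'>' scan of L
  have hA : infer_pathway genes
      = (L.foldl (fun acc t => if t.2 > acc.2 then t else acc) ("Unknown", 0)).1 := by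
    unfold infer_pathway
    conv_lhs => rw [pv_table_map]
    rw [hL, List.foldl_map, List.foldl_map]
    refine congrArg Prod.fst (PySem.List.foldl_congr_mem _ _ _ _ ?_)
    intro acc i hi
    obtain ⟨-, -, hname⟩ := pv_table_facts i hi
    simp only [hname]
  -- B's zip is L
  have hlen14 : counts.length = 14 := by
    rw [hcounts]; exact pv_counts_length genes
  have hzip : pvNamesAlt.zip counts = L := by
    have hN14 : pvNamesAlt.length = 14 := by decide
    apply List.ext_getElem
    · simp [hlen14, hL, hN14]
    · intro i h1 h2
      have hi14 : i < 14 := by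
        have := List.length_zip (l₁ := pvNamesAlt) (l₂ := counts)
        omega
      have hiR : i ∈ List.range 14 := List.mem_range.mpr hi14
      have hc := pv_counts_getD genes i hiR
      rw [← hcounts] at hc
      have hiN : i < pvNamesAlt.length := by
        simp only [pvNamesAlt, List.length_cons, List.length_nil]; omega
      have hiC : i < counts.length := by omega
      simp only [hL, List.getElem_map, List.getElem_range, List.getElem_zip]
      refine Prod.ext ?_ ?_
      · exact (List.getD_eq_getElem pvNamesAlt "" hiN).symm
      · rw [← hc, List.getD_eq_getElem counts 0 hiC]
  rw [hA]
  unfold infer_pathway_alt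
  show _ = (match PySem.List.max? (pvNamesAlt.zip counts) (fun t => t.2) with
            | some t => if t.2 > 0 then t.1 else "Unknown"
            | none => "Unknown")
  rw [hzip, pv_max?_foldl L]
  -- run the invariant over L
  have hnn : ∀ t ∈ L, 0 ≤ t.2 := by
    intro t ht
    rw [hL] at ht
    obtain ⟨i, -, rfl⟩ := List.mem_map.mp ht
    positivity
  have hfin := pv_scan L hnn ("Unknown", 0) none (Or.inl ⟨rfl, rfl⟩)
  rcases hfin with ⟨ho, ha⟩ | ⟨t, ho, -, hcase⟩
  · rw [ho, ha]
  · rw [ho]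
    rcases hcase with ⟨hpos, ha⟩ | ⟨hz, ha⟩
    · rw [ha]
      simp [show t.2 > 0 from hpos]
    · rw [ha]
      simp [hz]
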